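-- pv_equiv track=rewrite | github.com/KssK111/Matura | 2025-operonik/tablicowanie.py | tablica_iter
-- ===== SOURCE A (Python) =====
-- def tablica_iter(A: list[list[int]], i: int, n: int) -> int:
--     wynik = 0
--     while not i == n * n:
--         w = i // n
--         k = i % n
--         wynik += A[w][k]
--         i += 1
--     return wynik
-- ===== SOURCE B (Python) =====
-- def tablica_iter(A: list[list[int]], i: int, n: int) -> int:
--     if i == n * n:
--         return 0
--     w0, k0 = divmod(i, n)
--     total = sum(A[w0][k0:n])
--     for w in range(w0 + 1, n):
--         total += sum(A[w][:n])
--     return total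
-- ===== Notes on version B (the rewrite author's own statement) =====
-- stated objective: alternative
-- what changed: Replaced the flat per-element while-loop over linear indices (one floor-division and modulo per element) by a row-wise two-phase traversal: one slice-sum for the partial first row, then one slice-sum per remaining whole row.
-- outside the precondition, e.g. on tablica_iter([[1, 2, 3]], 0, -1): A returns 1, B returns 3
import Mathlib
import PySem

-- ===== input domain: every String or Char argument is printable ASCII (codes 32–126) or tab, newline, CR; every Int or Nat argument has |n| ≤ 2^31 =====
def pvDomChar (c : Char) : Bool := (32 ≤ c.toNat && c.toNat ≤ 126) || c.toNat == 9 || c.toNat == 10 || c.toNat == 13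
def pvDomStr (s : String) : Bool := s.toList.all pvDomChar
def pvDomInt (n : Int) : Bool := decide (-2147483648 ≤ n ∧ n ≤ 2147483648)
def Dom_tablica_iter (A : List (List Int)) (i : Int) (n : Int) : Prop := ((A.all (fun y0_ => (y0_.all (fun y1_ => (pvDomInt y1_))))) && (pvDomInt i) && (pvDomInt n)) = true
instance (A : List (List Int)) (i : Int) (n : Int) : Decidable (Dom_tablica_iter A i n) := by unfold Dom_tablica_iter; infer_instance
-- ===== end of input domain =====

-- B replaces A's flat per-linear-index while-loop by a row-wise traversal (partial first row, then whole rows); same cost, different decomposition.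

-- ===== PORT A =====
-- while-loop of A, with fuel = number of remaining iterations ((n*n - i).toNat at the call site)
def tablicaGoA (A : List (List Int)) (n : Int) : Nat → Int → Int → Int
  | 0, _, wynik => wynik
  | f+1, i, wynik =>
    if i = n * n then wynik
    else
      let w := PySem.Int.floordiv i n
      let k := PySem.Int.mod i n
      tablicaGoA A n f (i + 1) (wynik + PySem.List.pyGetD (PySem.List.pyGetD A w []) k 0)

def tablica_iter (A : List (List Int)) (i : Int) (n : Int) : Int :=
  tablicaGoA A n ((n * n - i).toNat) i 0

-- ===== PORT B =====
def tablica_iter_alt (A : List (List Int)) (i : Int) (n : Int) : Int :=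
  if i = n * n then 0
  else
    let w0 := PySem.Int.floordiv i n
    let k0 := PySem.Int.mod i n
    let total := (PySem.List.slice (PySem.List.pyGetD A w0 []) (some k0) (some n)).sum
    (PySem.List.pyRange (w0 + 1) n 1).foldl
      (fun acc w => acc + (PySem.List.slice (PySem.List.pyGetD A w []) none (some n)).sum) total

-- ===== PRECONDITION & SPEC =====
-- Pre_ = the natural domain: a linear index i ≤ n*n (possibly negative, Python-wraparound
-- rows included) into a grid with n ≥ 1 rows whose visited rows have length ≥ n.
-- It excludes: i > n*n (A loops forever), rows missing or shorter than n (A raises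
-- IndexError, or ZeroDivisionError for n = 0), and n < 0 with i < n*n, where A returns
-- (when it does) a value that is an accident of //-sign for a meaningless negative size.
def Pre_tablica_iter (A : List (List Int)) (i : Int) (n : Int) : Prop :=
  i ≤ n * n ∧
  (i ≠ n * n →
    0 < n ∧ n ≤ (A.length : Int) ∧
    ∀ w ∈ PySem.List.pyRange (PySem.Int.floordiv i n) n 1,
      n ≤ ((PySem.List.pyGetD A w []).length : Int))
instance (A : List (List Int)) (i : Int) (n : Int) : Decidable (Pre_tablica_iter A i n) := by
  unfold Pre_tablica_iter; infer_instance

def pvWitness_tablica_iter : List (List Int) × Int × Int := ([[1, 2], [3, 4]], 1, 2)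

def Spec_tablica_iter (A : List (List Int)) (i : Int) (n : Int) (out : Int) : Prop := out = tablica_iter_alt A i n
instance (A : List (List Int)) (i : Int) (n : Int) (out : Int) : Decidable (Spec_tablica_iter A i n out) := by unfold Spec_tablica_iter; infer_instance

-- ===== CLAIM (what is proved, stated in full; the proofs are below) =====
def Claim_equal_tablica_iter : Prop := ∀ (A : List (List Int)) (i : Int) (n : Int), Dom_tablica_iter A i n → Pre_tablica_iter A i n → Spec_tablica_iter A i n (tablica_iter A i n)

-- ===== LEMMAS AND PROOFS =====

-- the element A's loop adds at linear index j
def tablicaEntry (A : List (List Int)) (n : Int) (j : Int) : Int :=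
  PySem.List.pyGetD (PySem.List.pyGetD A (PySem.Int.floordiv j n) []) (PySem.Int.mod j n) 0

-- sum of f consecutive entries starting at linear index j
def tablicaSumE (A : List (List Int)) (n : Int) : Int → Nat → Int
  | _, 0 => 0
  | j, f+1 => tablicaEntry A n j + tablicaSumE A n (j + 1) f

theorem tablicaGoA_eq (A : List (List Int)) (n : Int) :
    ∀ (f : Nat) (i wynik : Int), i + (f : Int) = n * n →
      tablicaGoA A n f i wynik = wynik + tablicaSumE A n i f := by
  intro f
  induction f with
  | zero => intro i wynik h; simp [tablicaGoA, tablicaSumE]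
  | succ f ih =>
    intro i wynik h
    have hne : i ≠ n * n := by
      intro he
      rw [he] at h
      have h2 : ((f + 1 : Nat) : Int) = 0 := by linarith
      push_cast at h2; omega
    simp only [tablicaGoA, if_neg hne]
    rw [ih (i + 1) _ (by push_cast at h ⊢; linarith)]
    simp only [tablicaSumE, tablicaEntry]
    ring

theorem tablicaSumE_add (A : List (List Int)) (n : Int) :
    ∀ (a b : Nat) (j : Int),
      tablicaSumE A n j (a + b) = tablicaSumE A n j a + tablicaSumE A n (j + a) b := by
  intro a
  induction a with
  | zero => intro b j; simp [tablicaSumE]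
  | succ a ih =>
    intro b j
    rw [show a + 1 + b = (a + b) + 1 from by omega]
    simp only [tablicaSumE]
    rw [ih b (j + 1)]
    rw [show j + 1 + (a : Int) = j + ((a : Nat) + 1 : Nat) from by push_cast; ring]
    ring

theorem tablicaEntry_at (A : List (List Int)) (n w t : Int)
    (hn : 0 < n) (ht0 : 0 ≤ t) (htn : t < n)
    (hlen : n ≤ ((PySem.List.pyGetD A w []).length : Int)) :
    tablicaEntry A n (w * n + t) =
      (PySem.List.pyGetD A w [])[t.toNat]'(by omega) := by
  have hdiv : PySem.Int.floordiv (w * n + t) n = w := by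
    rw [PySem.Int.floordiv_eq_iff_of_pos hn]
    constructor <;> nlinarith
  have hmod : PySem.Int.mod (w * n + t) n = t := by
    have h := PySem.Int.floordiv_mul_add_mod (w * n + t) n
    rw [hdiv] at h
    linarith
  unfold tablicaEntry
  rw [hdiv, hmod]
  exact PySem.List.pyGetD_eq_getElem _ 0 ht0 (by omega)

-- a stretch of entries within one row is the sum of the corresponding drop/take segment
theorem tablicaSumE_row (A : List (List Int)) (n w : Int) (hn : 0 < n)
    (hlen : n ≤ ((PySem.List.pyGetD A w []).length : Int)) :
    ∀ (m : Nat) (k : Int), 0 ≤ k → k + (m : Int) = n →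
      tablicaSumE A n (w * n + k) m =
        (((PySem.List.pyGetD A w []).drop k.toNat).take m).sum := by
  intro m
  induction m with
  | zero => intro k hk0 hkn; simp [tablicaSumE]
  | succ m ih =>
    intro k hk0 hkn
    have hkn' : k < n := by omega
    have hkl : k.toNat < (PySem.List.pyGetD A w []).length := by omega
    simp only [tablicaSumE]
    rw [tablicaEntry_at A n w k hn hk0 hkn' hlen]
    rw [List.drop_eq_getElem_cons hkl]
    simp only [List.take_succ_cons, List.sum_cons]
    rw [show w * n + k + 1 = w * n + (k + 1) from by ring]
    rw [ih (k + 1) (by omega) (by omega)]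
    rw [show (k + 1).toNat = k.toNat + 1 from by omega]

-- the tail of the linear sum from a row boundary equals the per-row sums of B
theorem tablicaSumE_rows (A : List (List Int)) (n : Int) (hn : 0 < n) :
    ∀ (r : Nat) (w : Int), w + (r : Int) = n →
      (∀ v ∈ PySem.List.pyRange w n 1,
        n ≤ ((PySem.List.pyGetD A v []).length : Int)) →
      tablicaSumE A n (w * n) ((n * n - w * n).toNat) =
        ((PySem.List.pyRange w n 1).map
          (fun v => (PySem.List.slice (PySem.List.pyGetD A v []) none (some n)).sum)).sum := by
  intro r
  induction r with
  | zero =>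
    intro w hwn hrows
    have hwn' : w = n := by omega
    rw [hwn', PySem.List.pyRange_one_eq_nil (le_refl n),
      show (n * n - n * n).toNat = 0 from by simp]
    simp [tablicaSumE]
  | succ r ih =>
    intro w hwn hrows
    have hwlt : w < n := by omega
    have hlenw : n ≤ ((PySem.List.pyGetD A w []).length : Int) :=
      hrows w (by rw [PySem.List.mem_pyRange_one]; omega)
    have hsplit : (n * n - w * n).toNat = n.toNat + (n * n - (w + 1) * n).toNat := by
      have h1 : w * n + n ≤ n * n := by
        nlinarith [mul_le_mul_of_nonneg_right (show w + 1 ≤ n from by omega) (le_of_lt hn)]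
      rw [show (w + 1) * n = w * n + n from by ring]
      generalize n * n = s at h1 ⊢
      generalize w * n = b at h1 ⊢
      omega
    rw [hsplit, tablicaSumE_add]
    have hrow : tablicaSumE A n (w * n) n.toNat =
        (PySem.List.slice (PySem.List.pyGetD A w []) none (some n)).sum := by
      have h := tablicaSumE_row A n w hn hlenw n.toNat 0 (le_refl 0)
        (by omega)
      rw [show w * n + 0 = w * n from by ring] at h
      rw [h, PySem.List.slice_to _ (le_of_lt hn)]
      simp
    rw [hrow]
    rw [show w * n + ((n.toNat : Nat) : Int) = (w + 1) * n from by
      rw [Int.toNat_of_nonneg (le_of_lt hn)]; ring]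
    rw [ih (w + 1) (by omega)
      (fun v hv => hrows v (by rw [PySem.List.mem_pyRange_one] at hv ⊢; omega))]
    rw [PySem.List.pyRange_one_cons hwlt]
    simp

-- ===== VERDICT (by name: the statement is the Claim_ definition above) =====
theorem tablica_iter_spec : Claim_equal_tablica_iter := by
  intro A i n _hdom hpre
  obtain ⟨hin, hsh⟩ := hpre
  unfold Spec_tablica_iter tablica_iter
  by_cases he : i = n * n
  · subst he
    rw [show (n * n - n * n).toNat = 0 from by simp]
    simp [tablicaGoA, tablica_iter_alt]
  · obtain ⟨hn, _hA, hrows⟩ := hsh he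
    simp only [tablica_iter_alt, if_neg he]
    have hilt : i < n * n := lt_of_le_of_ne hin he
    set w0 := PySem.Int.floordiv i n with hw0
    set k0 := PySem.Int.mod i n with hk0
    have hdecomp : w0 * n + k0 = i := PySem.Int.floordiv_mul_add_mod i n
    have hk0' : 0 ≤ k0 := PySem.Int.mod_nonneg i hn
    have hk0n : k0 < n := PySem.Int.mod_lt i hn
    have hw0n : w0 < n := by
      rw [hw0, PySem.Int.floordiv_lt_iff_lt_mul hn]; exact hilt
    rw [tablicaGoA_eq A n _ i 0 (by rw [Int.toNat_of_nonneg (by omega)]; ring)]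
    have hlen0 : n ≤ ((PySem.List.pyGetD A w0 []).length : Int) :=
      hrows w0 (by rw [PySem.List.mem_pyRange_one]; omega)
    -- split the linear sum: rest of row w0, then whole rows w0+1 .. n-1
    have hsplitN : (n * n - i).toNat = (n - k0).toNat + (n * n - (w0 + 1) * n).toNat := by
      have h3 : w0 * n + n ≤ n * n := by
        nlinarith [mul_le_mul_of_nonneg_right (show w0 + 1 ≤ n from by omega) (le_of_lt hn)]
      have hd : w0 * n + k0 = i := hdecomp
      rw [show (w0 + 1) * n = w0 * n + n from by ring]
      generalize n * n = s at h3 hilt hin ⊢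
      generalize w0 * n = b at h3 hd ⊢
      omega
    rw [hsplitN, tablicaSumE_add]
    -- first chunk: the rest of row w0
    have hfirst : tablicaSumE A n i ((n - k0).toNat) =
        (PySem.List.slice (PySem.List.pyGetD A w0 []) (some k0) (some n)).sum := by
      have h := tablicaSumE_row A n w0 hn hlen0 (n - k0).toNat k0 hk0'
        (by rw [Int.toNat_of_nonneg (by omega)]; ring)
      rw [hdecomp] at h
      rw [h]
      have hs := PySem.List.slice_natCast (PySem.List.pyGetD A w0 []) k0.toNat n.toNat
      rw [Int.toNat_of_nonneg hk0', Int.toNat_of_nonneg (le_of_lt hn)] at hs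
      rw [show n.toNat - k0.toNat = (n - k0).toNat from by omega] at hs
      rw [hs]
    rw [hfirst]
    -- remaining whole rows
    have hstart : i + (((n - k0).toNat : Nat) : Int) = (w0 + 1) * n := by
      rw [Int.toNat_of_nonneg (by omega)]
      linear_combination -hdecomp
    rw [hstart]
    rw [tablicaSumE_rows A n hn (n - (w0 + 1)).toNat (w0 + 1) (by omega)
      (fun v hv => hrows v (by rw [PySem.List.mem_pyRange_one] at hv ⊢; omega))]
    rw [PySem.List.foldl_add]
    exact zero_add _
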